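-- pv_equiv track=rewrite | github.com/vaibhav-jain-dev/learning-algo | problems/200-must-solve/arrays/03-sorted-squared-array/similar/02-sorted-squared-no-duplicates/python_code.py | sorted_squared_unique
-- ===== SOURCE A (Python) =====
-- from typing import List
--
-- def sorted_squared_unique(array: List[int]) -> List[int]:
--     """
--     Square and deduplicate using two pointers.
--
--     Key Insight: Build result from largest to smallest, skip duplicates.
--
--     Visual for [-3, -2, -1, 1, 2, 3]:
--         L                   R
--         -3  -2  -1  1  2  3
--
--         |−3|² = 9, |3|² = 9 → both equal, add 9, move both
--         |−2|² = 4, |2|² = 4 → both equal, add 4, move both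
--         |−1|² = 1, |1|² = 1 → both equal, add 1, move both
--
--         Result (reversed): [1, 4, 9]
--     """
--     if not array:
--         return []
--
--     n = len(array)
--     result = []
--     left, right = 0, n - 1
--     last_added = None
--
--     while left <= right:
--         left_sq = array[left] ** 2
--         right_sq = array[right] ** 2
--
--         if left_sq > right_sq:
--             if last_added is None or left_sq != last_added:
--                 result.append(left_sq)
--                 last_added = left_sq
--             left += 1
--         elif right_sq > left_sq:
--             if last_added is None or right_sq != last_added:
--                 result.append(right_sq)
--                 last_added = right_sq
--             right -= 1
--         else:  # left_sq == right_sq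
--             if last_added is None or left_sq != last_added:
--                 result.append(left_sq)
--                 last_added = left_sq
--             left += 1
--             right -= 1
--
--     # Result is in descending order, reverse it
--     return result[::-1]
-- ===== SOURCE B (Python) =====
-- from typing import List
--
-- def sorted_squared_unique(array: List[int]) -> List[int]:
--     """Hash-set dedup of squares, then one comparison sort."""
--     return sorted({x * x for x in array})
-- ===== Notes on version B (the rewrite author's own statement) =====
-- stated objective: simpler
-- what changed: Replaces the two-pointer descending merge with last_added dedup and final reversal by building a hash set of squares in one pass and sorting it ascending; Pre_ admits the arrays whose squares peak at an endpoint of every window (all sorted arrays, ascending or descending, as the docstring requires), excluding unsorted inputs with an interior larger square on which A's returned order is an accidental artefact of the two-pointer traversal.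
-- outside the precondition, e.g. on sorted_squared_unique([1, 3, 2]): A returns [1, 9, 4], B returns [1, 4, 9]
import Mathlib
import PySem

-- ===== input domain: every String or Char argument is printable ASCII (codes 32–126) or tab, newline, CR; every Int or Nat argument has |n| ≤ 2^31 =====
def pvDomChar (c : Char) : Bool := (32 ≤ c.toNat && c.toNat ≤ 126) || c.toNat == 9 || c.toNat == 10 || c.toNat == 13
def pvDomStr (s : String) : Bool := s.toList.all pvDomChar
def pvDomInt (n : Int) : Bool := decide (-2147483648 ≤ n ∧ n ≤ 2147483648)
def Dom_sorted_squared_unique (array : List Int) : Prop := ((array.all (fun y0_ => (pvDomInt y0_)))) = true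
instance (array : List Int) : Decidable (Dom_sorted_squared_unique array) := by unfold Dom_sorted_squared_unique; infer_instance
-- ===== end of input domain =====

-- B replaces A's two-pointer merge by sorted(set of squares): simpler, one dedup pass plus a sort.
-- Equivalence is claimed on the inputs admitted by Pre_ below (covers the documented sorted-array domain).

-- ===== PORT A =====
-- the while-loop; fuel = array.length always suffices (window shrinks each step).
-- array[left]/array[right] are always in range (0 ≤ left ≤ right < n), so getD's default is never used;
-- Nat `right - 1` at right = 0 only happens when the loop is about to end, same as Python's -1.
def ssuLoop (array : List Int) : Nat → Nat → Nat → Option Int → List Int → List Int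
  | 0, _, _, _, result => result
  | f+1, left, right, last, result =>
    if left ≤ right then
      let left_sq := (array.getD left 0) ^ 2
      let right_sq := (array.getD right 0) ^ 2
      if right_sq < left_sq then
        if last.all (fun m => decide (left_sq ≠ m)) then
          ssuLoop array f (left+1) right (some left_sq) (result ++ [left_sq])
        else
          ssuLoop array f (left+1) right last result
      else if left_sq < right_sq then
        if last.all (fun m => decide (right_sq ≠ m)) then
          ssuLoop array f left (right-1) (some right_sq) (result ++ [right_sq])
        else
          ssuLoop array f left (right-1) last result
      else
        if last.all (fun m => decide (left_sq ≠ m)) then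
          ssuLoop array f (left+1) (right-1) (some left_sq) (result ++ [left_sq])
        else
          ssuLoop array f (left+1) (right-1) last result
    else result

def sorted_squared_unique (array : List Int) : List Int :=
  if array = [] then []
  else (ssuLoop array array.length 0 (array.length - 1) none []).reverse  -- result[::-1]

-- ===== PORT B =====
def sorted_squared_unique_alt (array : List Int) : List Int :=
  PySem.List.sorted (PySem.Set.ofList (array.map (fun x => x * x))) (fun x => x) false

-- ===== PRECONDITION & SPEC =====
-- Pre_ admits exactly the arrays whose squares attain their maximum at an endpoint of every
-- window — in particular every non-decreasing and every non-increasing array (the docstring's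
-- contract is a sorted array) and every array of length ≤ 2. Excluded are unsorted inputs with
-- a strictly interior larger square, on which A still returns but in an accidental order that
-- is an artefact of the two-pointer traversal.
def Pre_sorted_squared_unique (array : List Int) : Prop :=
  ∀ i, i < array.length → ∀ j, j < array.length → ∀ k, k < array.length →
    i ≤ j → j ≤ k →
    (array.getD j 0)^2 ≤ max ((array.getD i 0)^2) ((array.getD k 0)^2)
instance (array : List Int) : Decidable (Pre_sorted_squared_unique array) := by
  unfold Pre_sorted_squared_unique; infer_instance

def pvWitness_sorted_squared_unique : List Int := [-3, -1, 2, 2, 3]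

def Spec_sorted_squared_unique (array : List Int) (out : List Int) : Prop := out = sorted_squared_unique_alt array
instance (array : List Int) (out : List Int) : Decidable (Spec_sorted_squared_unique array out) := by unfold Spec_sorted_squared_unique; infer_instance

-- ===== CLAIM (what is proved, stated in full; the proofs are below) =====
def Claim_equal_sorted_squared_unique : Prop := ∀ (array : List Int), Dom_sorted_squared_unique array → Pre_sorted_squared_unique array → Spec_sorted_squared_unique array (sorted_squared_unique array)

-- ===== LEMMAS AND PROOFS =====

-- "the value `last` admits square s": none admits everything, some m admits s ≤ m
def lastOk (last : Option Int) (s : Int) : Prop := ∀ m, last = some m → s ≤ m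

theorem lastOk_none (s : Int) : lastOk none s := by intro m h; cases h

theorem all_ne_iff (last : Option Int) (a : Int) :
    (last.all (fun m => decide (a ≠ m)) = true) ↔ ∀ m, last = some m → a ≠ m := by
  cases last <;> simp

theorem all_ne_false (last : Option Int) (a : Int)
    (h : ¬ (last.all (fun m => decide (a ≠ m)) = true)) : last = some a := by
  cases last with
  | none => simp at h
  | some m => simp at h; rw [h]

-- the loop appends to acc exactly the distinct window squares not equal to `last`, in strictly
-- descending order
theorem ssuLoop_spec (array : List Int) (hs : Pre_sorted_squared_unique array) :
    ∀ (fuel : Nat) (left right : Nat) (last : Option Int) (acc : List Int),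
    right < array.length →
    right + 1 - left ≤ fuel →
    (∀ i, left ≤ i → i ≤ right → lastOk last ((array.getD i 0)^2)) →
    ∃ tail,
      ssuLoop array fuel left right last acc = acc ++ tail ∧
      List.Pairwise (· > ·) tail ∧
      (∀ s, s ∈ tail ↔ ((∃ i, left ≤ i ∧ i ≤ right ∧ s = (array.getD i 0)^2) ∧ last ≠ some s)) := by
  intro fuel
  induction fuel with
  | zero =>
    intro left right last acc hrlen hfuel _
    refine ⟨[], by simp [ssuLoop], List.Pairwise.nil, ?_⟩
    intro s
    constructor
    · intro h; cases h
    · rintro ⟨⟨i, hli, hir, _⟩, _⟩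
      omega
  | succ f ih =>
    intro left right last acc hrlen hfuel hlast
    by_cases hlr : left ≤ right
    · have hwin : ∀ i, left ≤ i → i ≤ right →
          (array.getD i 0)^2 ≤ max ((array.getD left 0)^2) ((array.getD right 0)^2) := by
        intro i h1 h2
        exact hs left (by omega) i (by omega) right hrlen h1 h2
      simp only [ssuLoop]
      rw [if_pos hlr]
      split_ifs with hba hc hab hc hc
      · -- left_sq > right_sq, added
        have hcne : ∀ m, last = some m → (array.getD left 0)^2 ≠ m := (all_ne_iff _ _).mp hc
        have hlast' : ∀ i, left+1 ≤ i → i ≤ right → lastOk (some ((array.getD left 0)^2)) ((array.getD i 0)^2) := by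
          intro i h1 h2 m hm
          have := hwin i (by omega) h2
          rw [max_eq_left (le_of_lt hba)] at this
          rw [← Option.some.inj hm]; exact this
        obtain ⟨tail', heq, hpw, hmem⟩ := ih (left+1) right (some ((array.getD left 0)^2))
          (acc ++ [(array.getD left 0)^2]) hrlen (by omega) hlast'
        refine ⟨(array.getD left 0)^2 :: tail', by simpa using heq, ?_, ?_⟩
        · refine List.pairwise_cons.mpr ⟨?_, hpw⟩
          intro s hsmem
          obtain ⟨⟨i, h1, h2, hsi⟩, hne⟩ := (hmem s).mp hsmem
          have : s ≤ max ((array.getD left 0)^2) ((array.getD right 0)^2) := hsi ▸ hwin i (by omega) h2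
          have hsa : s ≠ (array.getD left 0)^2 := fun h => hne (by rw [h])
          have : s ≤ (array.getD left 0)^2 := by
            rw [max_eq_left (le_of_lt hba)] at this; exact this
          omega
        · intro s
          simp only [List.mem_cons, hmem]
          constructor
          · rintro (rfl | ⟨⟨i, h1, h2, hsi⟩, hne⟩)
            · exact ⟨⟨left, le_refl _, hlr, rfl⟩, fun h => hcne _ h rfl⟩
            · refine ⟨⟨i, by omega, h2, hsi⟩, ?_⟩
              intro h
              have hmax : s ≤ (array.getD left 0)^2 := by
                have := hsi ▸ hwin i (by omega) h2
                rw [max_eq_left (le_of_lt hba)] at this; exact this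
              have := hcne s h
              have hwl := hlast left (le_refl _) hlr
              have : (array.getD left 0)^2 ≤ s := hwl s h
              have hsa : s ≠ (array.getD left 0)^2 := fun hh => hne (by rw [hh])
              omega
          · rintro ⟨⟨i, h1, h2, hsi⟩, hne⟩
            by_cases hsa : s = (array.getD left 0)^2
            · exact Or.inl hsa
            · refine Or.inr ⟨⟨i, ?_, h2, hsi⟩, fun h => hsa (Option.some.inj h).symm⟩
              rcases Nat.eq_or_lt_of_le h1 with h | h
              · exact absurd (by rw [hsi, ← h]) hsa
              · omega
      · -- left_sq > right_sq, skipped: last = some left_sq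
        have hla : last = some ((array.getD left 0)^2) := all_ne_false _ _ hc
        have hlast' : ∀ i, left+1 ≤ i → i ≤ right → lastOk last ((array.getD i 0)^2) := by
          intro i h1 h2 m hm
          have := hwin i (by omega) h2
          rw [max_eq_left (le_of_lt hba)] at this
          rw [hla] at hm
          rw [← Option.some.inj hm]; exact this
        obtain ⟨tail', heq, hpw, hmem⟩ := ih (left+1) right last acc hrlen (by omega) hlast'
        refine ⟨tail', heq, hpw, ?_⟩
        intro s
        rw [hmem s]
        constructor
        · rintro ⟨⟨i, h1, h2, hsi⟩, hne⟩
          exact ⟨⟨i, by omega, h2, hsi⟩, hne⟩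
        · rintro ⟨⟨i, h1, h2, hsi⟩, hne⟩
          refine ⟨⟨i, ?_, h2, hsi⟩, hne⟩
          rcases Nat.eq_or_lt_of_le h1 with h | h
          · exfalso; exact hne (by rw [hla, h, hsi])
          · omega
      · -- right_sq > left_sq, added
        have hlt : left < right := by
          rcases Nat.eq_or_lt_of_le hlr with h | h
          · exfalso; rw [h] at hab; exact lt_irrefl _ hab
          · exact h
        have hcne : ∀ m, last = some m → (array.getD right 0)^2 ≠ m := (all_ne_iff _ _).mp hc
        have hlast' : ∀ i, left ≤ i → i ≤ right-1 → lastOk (some ((array.getD right 0)^2)) ((array.getD i 0)^2) := by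
          intro i h1 h2 m hm
          have := hwin i h1 (by omega)
          rw [max_eq_right (le_of_lt hab)] at this
          rw [← Option.some.inj hm]; exact this
        obtain ⟨tail', heq, hpw, hmem⟩ := ih left (right-1) (some ((array.getD right 0)^2))
          (acc ++ [(array.getD right 0)^2]) (by omega) (by omega) hlast'
        refine ⟨(array.getD right 0)^2 :: tail', by simpa using heq, ?_, ?_⟩
        · refine List.pairwise_cons.mpr ⟨?_, hpw⟩
          intro s hsmem
          obtain ⟨⟨i, h1, h2, hsi⟩, hne⟩ := (hmem s).mp hsmem
          have : s ≤ max ((array.getD left 0)^2) ((array.getD right 0)^2) := hsi ▸ hwin i h1 (by omega)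
          have hsa : s ≠ (array.getD right 0)^2 := fun h => hne (by rw [h])
          have : s ≤ (array.getD right 0)^2 := by
            rw [max_eq_right (le_of_lt hab)] at this; exact this
          omega
        · intro s
          simp only [List.mem_cons, hmem]
          constructor
          · rintro (rfl | ⟨⟨i, h1, h2, hsi⟩, hne⟩)
            · exact ⟨⟨right, hlr, le_refl _, rfl⟩, fun h => hcne _ h rfl⟩
            · refine ⟨⟨i, h1, by omega, hsi⟩, ?_⟩
              intro h
              have hmax : s ≤ (array.getD right 0)^2 := by
                have := hsi ▸ hwin i h1 (by omega)
                rw [max_eq_right (le_of_lt hab)] at this; exact this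
              have := hcne s h
              have hwr := hlast right hlr (le_refl _)
              have : (array.getD right 0)^2 ≤ s := hwr s h
              have hsa : s ≠ (array.getD right 0)^2 := fun hh => hne (by rw [hh])
              omega
          · rintro ⟨⟨i, h1, h2, hsi⟩, hne⟩
            by_cases hsa : s = (array.getD right 0)^2
            · exact Or.inl hsa
            · refine Or.inr ⟨⟨i, h1, ?_, hsi⟩, fun h => hsa (Option.some.inj h).symm⟩
              rcases Nat.eq_or_lt_of_le h2 with h | h
              · exact absurd (by rw [hsi, h]) hsa
              · omega
      · -- right_sq > left_sq, skipped
        have hlt : left < right := by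
          rcases Nat.eq_or_lt_of_le hlr with h | h
          · exfalso; rw [h] at hab; exact lt_irrefl _ hab
          · exact h
        have hla : last = some ((array.getD right 0)^2) := all_ne_false _ _ hc
        have hlast' : ∀ i, left ≤ i → i ≤ right-1 → lastOk last ((array.getD i 0)^2) := by
          intro i h1 h2 m hm
          have := hwin i h1 (by omega)
          rw [max_eq_right (le_of_lt hab)] at this
          rw [hla] at hm
          rw [← Option.some.inj hm]; exact this
        obtain ⟨tail', heq, hpw, hmem⟩ := ih left (right-1) last acc (by omega) (by omega) hlast'
        refine ⟨tail', heq, hpw, ?_⟩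
        intro s
        rw [hmem s]
        constructor
        · rintro ⟨⟨i, h1, h2, hsi⟩, hne⟩
          exact ⟨⟨i, h1, by omega, hsi⟩, hne⟩
        · rintro ⟨⟨i, h1, h2, hsi⟩, hne⟩
          refine ⟨⟨i, h1, ?_, hsi⟩, hne⟩
          rcases Nat.eq_or_lt_of_le h2 with h | h
          · exfalso; apply hne; rw [hla, ← h, hsi]
          · omega
      · -- equal squares, added
        have hcne : ∀ m, last = some m → (array.getD left 0)^2 ≠ m := (all_ne_iff _ _).mp hc
        have heqab : (array.getD left 0)^2 = (array.getD right 0)^2 := le_antisymm (not_lt.mp hba) (not_lt.mp hab)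
        have hlast' : ∀ i, left+1 ≤ i → i ≤ right-1 → lastOk (some ((array.getD left 0)^2)) ((array.getD i 0)^2) := by
          intro i h1 h2 m hm
          have := hwin i (by omega) (by omega)
          rw [← heqab, max_self] at this
          rw [← Option.some.inj hm]; exact this
        obtain ⟨tail', heq, hpw, hmem⟩ := ih (left+1) (right-1) (some ((array.getD left 0)^2))
          (acc ++ [(array.getD left 0)^2]) (by omega) (by omega) hlast'
        refine ⟨(array.getD left 0)^2 :: tail', by simpa using heq, ?_, ?_⟩
        · refine List.pairwise_cons.mpr ⟨?_, hpw⟩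
          intro s hsmem
          obtain ⟨⟨i, h1, h2, hsi⟩, hne⟩ := (hmem s).mp hsmem
          have : s ≤ max ((array.getD left 0)^2) ((array.getD right 0)^2) := hsi ▸ hwin i (by omega) (by omega)
          have hsa : s ≠ (array.getD left 0)^2 := fun h => hne (by rw [h])
          have : s ≤ (array.getD left 0)^2 := by
            rw [← heqab, max_self] at this; exact this
          omega
        · intro s
          simp only [List.mem_cons, hmem]
          constructor
          · rintro (rfl | ⟨⟨i, h1, h2, hsi⟩, hne⟩)
            · exact ⟨⟨left, le_refl _, hlr, rfl⟩, fun h => hcne _ h rfl⟩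
            · refine ⟨⟨i, by omega, by omega, hsi⟩, ?_⟩
              intro h
              have hmax : s ≤ (array.getD left 0)^2 := by
                have := hsi ▸ hwin i (by omega) (by omega)
                rw [← heqab, max_self] at this; exact this
              have := hcne s h
              have hwl := hlast left (le_refl _) hlr
              have : (array.getD left 0)^2 ≤ s := hwl s h
              have hsa : s ≠ (array.getD left 0)^2 := fun hh => hne (by rw [hh])
              omega
          · rintro ⟨⟨i, h1, h2, hsi⟩, hne⟩
            by_cases hsa : s = (array.getD left 0)^2
            · exact Or.inl hsa
            · refine Or.inr ⟨⟨i, ?_, ?_, hsi⟩, fun h => hsa (Option.some.inj h).symm⟩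
              · rcases Nat.eq_or_lt_of_le h1 with h | h
                · exact absurd (by rw [hsi, ← h]) hsa
                · omega
              · rcases Nat.eq_or_lt_of_le h2 with h | h
                · exfalso; apply hsa; rw [hsi, h, ← heqab]
                · omega
      · -- equal squares, skipped
        have hla : last = some ((array.getD left 0)^2) := all_ne_false _ _ hc
        have heqab : (array.getD left 0)^2 = (array.getD right 0)^2 := le_antisymm (not_lt.mp hba) (not_lt.mp hab)
        have hlast' : ∀ i, left+1 ≤ i → i ≤ right-1 → lastOk last ((array.getD i 0)^2) := by
          intro i h1 h2 m hm
          have := hwin i (by omega) (by omega)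
          rw [← heqab, max_self] at this
          rw [hla] at hm
          rw [← Option.some.inj hm]; exact this
        obtain ⟨tail', heq, hpw, hmem⟩ := ih (left+1) (right-1) last acc (by omega) (by omega) hlast'
        refine ⟨tail', heq, hpw, ?_⟩
        intro s
        rw [hmem s]
        constructor
        · rintro ⟨⟨i, h1, h2, hsi⟩, hne⟩
          exact ⟨⟨i, by omega, by omega, hsi⟩, hne⟩
        · rintro ⟨⟨i, h1, h2, hsi⟩, hne⟩
          have hil : left < i := by
            rcases Nat.eq_or_lt_of_le h1 with h | h
            · exfalso; exact hne (by rw [hla, h, hsi])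
            · exact h
          have hir : i < right := by
            rcases Nat.eq_or_lt_of_le h2 with h | h
            · exfalso; apply hne; rw [hla, hsi, h, heqab]
            · exact h
          exact ⟨⟨i, by omega, by omega, hsi⟩, hne⟩
    · refine ⟨[], ?_, List.Pairwise.nil, ?_⟩
      · simp [ssuLoop, hlr]
      · intro s
        constructor
        · intro h; cases h
        · rintro ⟨⟨i, hli, hir, _⟩, _⟩
          omega

-- ===== VERDICT (by name: the statement is the Claim_ definition above) =====
theorem sorted_squared_unique_spec : Claim_equal_sorted_squared_unique := by
  intro array _ hpre
  unfold Spec_sorted_squared_unique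
  by_cases he : array = []
  · subst he
    rfl
  · have hlen : 0 < array.length := List.length_pos_of_ne_nil he
    obtain ⟨tail, heq, hpw, hmem⟩ := ssuLoop_spec array hpre array.length 0 (array.length - 1)
      none [] (by omega) (by omega) (fun i _ _ => lastOk_none _)
    have hres : sorted_squared_unique array = tail.reverse := by
      simp [sorted_squared_unique, he, heq]
    rw [hres, sorted_squared_unique_alt]
    have hmem' : ∀ s : Int, s ∈ tail.reverse ↔ s ∈ PySem.Set.ofList (array.map (fun x => x * x)) := by
      intro s
      rw [List.mem_reverse, hmem s, PySem.Set.mem_ofList, List.mem_map]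
      constructor
      · rintro ⟨⟨i, _, h2, hsi⟩, _⟩
        have hilen : i < array.length := by omega
        refine ⟨array[i], List.getElem_mem hilen, ?_⟩
        rw [hsi, List.getD_eq_getElem _ _ hilen]; ring
      · rintro ⟨x, hx, rfl⟩
        obtain ⟨i, hilen, hxi⟩ := List.mem_iff_getElem.mp hx
        refine ⟨⟨i, Nat.zero_le _, by omega, ?_⟩, by simp⟩
        rw [List.getD_eq_getElem _ _ hilen, hxi]; ring
    have hnd : tail.reverse.Nodup := by
      rw [List.nodup_reverse]
      exact List.Pairwise.imp (fun h => ne_of_gt h) hpw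
    have hperm : tail.reverse.Perm (PySem.Set.ofList (array.map (fun x => x * x))) := by
      rw [List.perm_ext_iff_of_nodup hnd (PySem.Set.nodup_ofList _)]
      exact hmem'
    exact (PySem.List.sorted_eq_of_perm_of_pairwise_lt _ _ (fun x => x) hperm
      (by rw [List.pairwise_reverse]; exact hpw)).symm
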